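-- pv_equiv track=rewrite | github.com/lefake/S4-P3-Projet | pcbdevice/gcode/path.py | scanVertical
-- ===== SOURCE A (Python) =====
-- def scanVertical(image, rTool):
-- 	"""
-- 	:param image: image to apply the scan
-- 	:param rTool: tool radius
-- 	:return: adds 2's where there should be a path for the tool, looking at the image only vertically
-- 	"""
--
-- 	width = len(image[0])
-- 	height = len(image)
--
-- 	for line in range(height):
-- 		for column in range(width):
--
-- 			if line > 0:
-- 				if image[line][column] == 1 and image[line - 1][column] != 1:
-- 					for px in range(2 * rTool + 1):
-- 						if line - rTool >= 0 and 0 <= column - rTool + px < width: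
-- 							if image[line - rTool][column - rTool + px] == 0:
-- 								image[line - rTool][column - rTool + px] = 2
--
-- 			if line < height - 1:
-- 				if image[line][column] == 1 and image[line + 1][column] != 1:
-- 					for px in range(2 * rTool + 1):
-- 						if line + rTool < height and 0 <= column - rTool + px < width:
-- 							if image[line + rTool][column - rTool + px] == 0:
-- 								image[line + rTool][column - rTool + px] = 2
--
-- 	return image
-- ===== SOURCE B (Python) =====
-- def scanVertical(image, rTool):
-- 	"""Column-major edge detection into a set of marks, then one pointwise
-- 	repaint sweep over the whole grid (only return-value equivalence with the
-- 	original is claimed; both mutate image in place).  Correct because the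
-- 	original's paints only turn 0s into 2s, so they never change any ==1 test,
-- 	and painting is idempotent, so only the SET of targeted cells matters."""
-- 	width = len(image[0])
-- 	height = len(image)
--
-- 	marks = set()
-- 	for column in range(width):
-- 		for line in range(height):
-- 			if image[line][column] != 1:
-- 				continue
-- 			lo = max(0, column - rTool)
-- 			hi = min(width, column + rTool + 1)
-- 			if line > 0 and image[line - 1][column] != 1 and line - rTool >= 0:
-- 				for c in range(lo, hi):
-- 					marks.add((line - rTool, c))
-- 			if line < height - 1 and image[line + 1][column] != 1 and line + rTool < height:
-- 				for c in range(lo, hi):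
-- 					marks.add((line + rTool, c))
--
-- 	for i in range(height):
-- 		row = image[i]
-- 		for j in range(width):
-- 			if row[j] == 0 and (i, j) in marks:
-- 				row[j] = 2
-- 	return image
-- ===== Notes on version B (the rewrite author's own statement) =====
-- stated objective: alternative
-- what changed: Replaced the row-major paint-while-scanning loop with a column-major edge-detection pass that accumulates a SET of target cells (segments clipped up front via max/min instead of per-pixel bound checks inside the px loop, deduplicated by the set) followed by a pointwise repaint sweep over the grid that membership-tests the set; correct because the original's paints only turn 0s into 2s (never touching any ==1 test) and are idempotent, so only the set of targeted cells matters.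
import Mathlib
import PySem

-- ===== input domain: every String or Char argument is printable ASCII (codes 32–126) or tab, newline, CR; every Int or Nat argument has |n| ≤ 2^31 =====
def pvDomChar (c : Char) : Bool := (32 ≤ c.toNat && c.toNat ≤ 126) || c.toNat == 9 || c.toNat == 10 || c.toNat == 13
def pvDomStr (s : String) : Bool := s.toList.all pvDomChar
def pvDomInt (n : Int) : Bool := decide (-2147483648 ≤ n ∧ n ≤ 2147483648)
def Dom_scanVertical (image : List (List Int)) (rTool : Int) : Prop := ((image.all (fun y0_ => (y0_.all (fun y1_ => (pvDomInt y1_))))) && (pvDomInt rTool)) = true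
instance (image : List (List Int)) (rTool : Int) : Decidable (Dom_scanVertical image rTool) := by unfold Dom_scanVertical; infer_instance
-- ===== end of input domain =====

-- B replaces A's row-major paint-while-scanning with a column-major detection pass building a
-- SET of target cells and a pointwise repaint sweep over the grid; same return value, same
-- in-place intent (the equivalence proved here is about the return value).


-- shared 2-D indexing helpers (total; indices are in range on every access made inside Pre_)
def pvGet (im : List (List Int)) (i j : Int) : Int := (im.getD i.toNat []).getD j.toNat 0
def pvSet2 (im : List (List Int)) (i j : Int) : List (List Int) :=
  im.modify i.toNat (fun row => row.modify j.toNat (fun _ => 2))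

-- ===== PORT A =====
def scanVertical (image : List (List Int)) (rTool : Int) : List (List Int) :=
  let width : Int := (image.headI.length : Int)
  let height : Int := (image.length : Int)
  (PySem.List.pyRange 0 height 1).foldl (fun imL line =>
    (PySem.List.pyRange 0 width 1).foldl (fun imC column =>
      let im1 := if line > 0 ∧ pvGet imC line column = 1 ∧ pvGet imC (line - 1) column ≠ 1 then
          (PySem.List.pyRange 0 (2 * rTool + 1) 1).foldl (fun acc px =>
            if line - rTool ≥ 0 ∧ 0 ≤ column - rTool + px ∧ column - rTool + px < width then
              (if pvGet acc (line - rTool) (column - rTool + px) = 0 then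
                pvSet2 acc (line - rTool) (column - rTool + px) else acc)
            else acc) imC
        else imC
      if line < height - 1 ∧ pvGet im1 line column = 1 ∧ pvGet im1 (line + 1) column ≠ 1 then
          (PySem.List.pyRange 0 (2 * rTool + 1) 1).foldl (fun acc px =>
            if line + rTool < height ∧ 0 ≤ column - rTool + px ∧ column - rTool + px < width then
              (if pvGet acc (line + rTool) (column - rTool + px) = 0 then
                pvSet2 acc (line + rTool) (column - rTool + px) else acc)
            else acc) im1
        else im1) imL) image

-- ===== PORT B =====
-- B's first pass: column-major scan of the untouched image; each detected edge adds the
-- clipped horizontal segment [max(0,column-rTool), min(width,column+rTool+1)) to a set.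
def svAddRow (m : PySem.Set (Int × Int)) (width rTool r column : Int) : PySem.Set (Int × Int) :=
  (PySem.List.pyRange (max 0 (column - rTool)) (min width (column + rTool + 1)) 1).foldl
    (fun m c => PySem.Set.add m (r, c)) m

def svLineStep (image : List (List Int)) (width height rTool column : Int)
    (m : PySem.Set (Int × Int)) (line : Int) : PySem.Set (Int × Int) :=
  if pvGet image line column ≠ 1 then m
  else
    let m1 := if line > 0 ∧ pvGet image (line - 1) column ≠ 1 ∧ line - rTool ≥ 0 then
        svAddRow m width rTool (line - rTool) column else m
    if line < height - 1 ∧ pvGet image (line + 1) column ≠ 1 ∧ line + rTool < height then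
      svAddRow m1 width rTool (line + rTool) column else m1

def svDetect (image : List (List Int)) (width height rTool : Int) : PySem.Set (Int × Int) :=
  (PySem.List.pyRange 0 width 1).foldl (fun m column =>
    (PySem.List.pyRange 0 height 1).foldl (svLineStep image width height rTool column) m)
    PySem.Set.empty

def scanVertical_alt (image : List (List Int)) (rTool : Int) : List (List Int) :=
  let width : Int := (image.headI.length : Int)
  let height : Int := (image.length : Int)
  let marks := svDetect image width height rTool
  -- B's second pass: pointwise sweep over the whole grid, membership-testing the set
  (PySem.List.pyRange 0 height 1).foldl (fun im i =>
    (PySem.List.pyRange 0 width 1).foldl (fun im j =>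
      if pvGet im i j = 0 ∧ PySem.Set.contains marks (i, j) = true then pvSet2 im i j else im) im) image

-- ===== PRECONDITION & SPEC =====
-- Pre_: exactly the inputs where Python A returns normally (no IndexError): the image is
-- nonempty and every row is at least as long as row 0 (the scanned width).
def Pre_scanVertical (image : List (List Int)) (rTool : Int) : Prop :=
  image ≠ [] ∧ ∀ row ∈ image, image.headI.length ≤ row.length
instance (image : List (List Int)) (rTool : Int) : Decidable (Pre_scanVertical image rTool) := by
  unfold Pre_scanVertical; infer_instance

def pvWitness_scanVertical : List (List Int) × Int := ([[0, 1], [1, 0], [0, 0]], 1)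

def Spec_scanVertical (image : List (List Int)) (rTool : Int) (out : List (List Int)) : Prop := out = scanVertical_alt image rTool
instance (image : List (List Int)) (rTool : Int) (out : List (List Int)) : Decidable (Spec_scanVertical image rTool out) := by unfold Spec_scanVertical; infer_instance

-- ===== CLAIM (what is proved, stated in full; the proofs are below) =====
def Claim_equal_scanVertical : Prop := ∀ (image : List (List Int)) (rTool : Int), Dom_scanVertical image rTool → Pre_scanVertical image rTool → Spec_scanVertical image rTool (scanVertical image rTool)

-- ===== LEMMAS AND PROOFS =====

-- the guarded 0↦2 write both programs perform, as a named step
def paint (im : List (List Int)) (rc : Int × Int) : List (List Int) :=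
  if pvGet im rc.1 rc.2 = 0 then pvSet2 im rc.1 rc.2 else im

-- b arises from a by painting some 0-cells to 2 (lengths preserved, every cell equal or 0↦2)
def SvRel (a b : List (List Int)) : Prop :=
  b.length = a.length ∧ ∀ i j : Nat,
    (b.getD i []).length = (a.getD i []).length ∧
    ((b.getD i []).getD j 0 = (a.getD i []).getD j 0 ∨
      ((a.getD i []).getD j 0 = 0 ∧ (b.getD i []).getD j 0 = 2))

theorem svRel_refl (a : List (List Int)) : SvRel a a :=
  ⟨rfl, fun _ _ => ⟨rfl, Or.inl rfl⟩⟩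

theorem svRel_pvGet {a b : List (List Int)} (h : SvRel a b) (i j : Int) :
    pvGet b i j = pvGet a i j ∨ (pvGet a i j = 0 ∧ pvGet b i j = 2) := by
  have := (h.2 i.toNat j.toNat).2
  simpa [pvGet] using this

theorem svRel_one {a b : List (List Int)} (h : SvRel a b) (i j : Int) :
    (pvGet b i j = 1) ↔ (pvGet a i j = 1) := by
  rcases svRel_pvGet h i j with h1 | ⟨h1, h2⟩
  · rw [h1]
  · constructor <;> intro hx <;> omega

theorem getD_modify {α : Type} (l : List α) (i k : Nat) (f : α → α) (d : α) :
    (l.modify i f).getD k d = if i = k ∧ k < l.length then f (l.getD k d) else l.getD k d := by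
  rcases lt_or_ge k l.length with hk | hk
  · by_cases hik : i = k <;>
      simp [List.getD_eq_getElem?_getD, hik, hk]
  · have h1 : ¬ k < l.length := not_lt.mpr hk
    simp [List.getD_eq_getElem?_getD, h1]

theorem svRel_paint {a b : List (List Int)} (h : SvRel a b) (rc : Int × Int) :
    SvRel a (paint b rc) := by
  by_cases h0 : pvGet b rc.1 rc.2 = 0
  · simp only [paint, if_pos h0]
    obtain ⟨hl, hc⟩ := h
    refine ⟨by simp [pvSet2, List.length_modify, hl], fun i j => ?_⟩
    have hrow : (pvSet2 b rc.1 rc.2).getD i []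
        = if rc.1.toNat = i ∧ i < b.length then
            (b.getD i []).modify rc.2.toNat (fun _ => 2) else b.getD i [] := by
      simp only [pvSet2]
      exact getD_modify b rc.1.toNat i _ []
    rw [hrow]
    by_cases hi : rc.1.toNat = i ∧ i < b.length
    · rw [if_pos hi]
      refine ⟨by rw [List.length_modify]; exact (hc i j).1, ?_⟩
      rw [getD_modify]
      by_cases hj : rc.2.toNat = j ∧ j < (b.getD i []).length
      · rw [if_pos hj]
        have hb0 : (b.getD i []).getD j 0 = 0 := by
          have h0' := h0
          simp only [pvGet] at h0'
          rw [hi.1, hj.1] at h0'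
          exact h0'
        rcases (hc i j).2 with he | ⟨ha, hb⟩
        · exact Or.inr ⟨by omega, rfl⟩
        · exact absurd hb0 (by omega)
      · rw [if_neg hj]; exact (hc i j).2
    · rw [if_neg hi]; exact hc i j
  · simpa only [paint, if_neg h0] using h

theorem svRel_paints {a b : List (List Int)} (h : SvRel a b) (ws : List (Int × Int)) :
    SvRel a (ws.foldl paint b) := by
  induction ws generalizing b with
  | nil => exact h
  | cons w ws ih => exact ih (svRel_paint h w)

-- the clipped segment as filter+map (A's form)
def segList (width rTool r column : Int) : List (Int × Int) :=
  ((PySem.List.pyRange 0 (2 * rTool + 1) 1).filter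
    (fun px => decide (0 ≤ column - rTool + px ∧ column - rTool + px < width))).map
    (fun px => (r, column - rTool + px))

-- A's guarded in-loop painting is a paint-fold over the filtered cell list
theorem paintFold_guard (P : Int → Prop) [DecidablePred P] (c : Int → Int) (r0 : Int)
    (l : List Int) (im : List (List Int)) :
    l.foldl (fun acc px =>
      if P px then (if pvGet acc r0 (c px) = 0 then pvSet2 acc r0 (c px) else acc) else acc) im
    = ((l.filter (fun px => decide (P px))).map (fun px => ((r0, c px) : Int × Int))).foldl paint im := by
  rw [List.foldl_map, List.foldl_filter]
  have : (fun (acc : List (List Int)) (px : Int) =>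
        if (fun px => decide (P px)) px = true then paint acc (r0, c px) else acc)
      = fun acc px =>
        if P px then (if pvGet acc r0 (c px) = 0 then pvSet2 acc r0 (c px) else acc) else acc := by
    funext acc px
    simp [paint]
  rw [this]

def upCells (width rTool line column : Int) : List (Int × Int) :=
  if line - rTool ≥ 0 then segList width rTool (line - rTool) column else []

def downCells (height width rTool line column : Int) : List (Int × Int) :=
  if line + rTool < height then segList width rTool (line + rTool) column else []

def upPart (img0 : List (List Int)) (width rTool line column : Int) : List (Int × Int) :=
  if pvGet img0 line column = 1 ∧ line > 0 ∧ pvGet img0 (line - 1) column ≠ 1 then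
    upCells width rTool line column else []

def dnPart (img0 : List (List Int)) (width height rTool line column : Int) : List (Int × Int) :=
  if pvGet img0 line column = 1 ∧ line < height - 1 ∧ pvGet img0 (line + 1) column ≠ 1 then
    downCells height width rTool line column else []

def posCells (img0 : List (List Int)) (width height rTool line column : Int) : List (Int × Int) :=
  if pvGet img0 line column = 1 then
    (if line > 0 ∧ pvGet img0 (line - 1) column ≠ 1 then upCells width rTool line column else [])
    ++ (if line < height - 1 ∧ pvGet img0 (line + 1) column ≠ 1 then
          downCells height width rTool line column else [])
  else []

-- A's per-position body, named
def stepA (width height rTool line : Int) (imC : List (List Int)) (column : Int) : List (List Int) :=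
  let im1 := if line > 0 ∧ pvGet imC line column = 1 ∧ pvGet imC (line - 1) column ≠ 1 then
      (PySem.List.pyRange 0 (2 * rTool + 1) 1).foldl (fun acc px =>
        if line - rTool ≥ 0 ∧ 0 ≤ column - rTool + px ∧ column - rTool + px < width then
          (if pvGet acc (line - rTool) (column - rTool + px) = 0 then
            pvSet2 acc (line - rTool) (column - rTool + px) else acc)
        else acc) imC
    else imC
  if line < height - 1 ∧ pvGet im1 line column = 1 ∧ pvGet im1 (line + 1) column ≠ 1 then
      (PySem.List.pyRange 0 (2 * rTool + 1) 1).foldl (fun acc px =>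
        if line + rTool < height ∧ 0 ≤ column - rTool + px ∧ column - rTool + px < width then
          (if pvGet acc (line + rTool) (column - rTool + px) = 0 then
            pvSet2 acc (line + rTool) (column - rTool + px) else acc)
        else acc) im1
    else im1

theorem posCells_eq (img0 : List (List Int)) (width height rTool line column : Int) :
    posCells img0 width height rTool line column
      = upPart img0 width rTool line column ++ dnPart img0 width height rTool line column := by
  unfold posCells upPart dnPart
  by_cases hg : pvGet img0 line column = 1 <;>
    by_cases h1 : line > 0 ∧ pvGet img0 (line - 1) column ≠ 1 <;>
    by_cases h2 : line < height - 1 ∧ pvGet img0 (line + 1) column ≠ 1 <;>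
    simp [hg, h1, h2]

-- A's up-scan from any image related to img0 paints exactly upPart
theorem stepA_up {img0 im : List (List Int)} (h : SvRel img0 im)
    (width rTool line column : Int) :
    (if line > 0 ∧ pvGet im line column = 1 ∧ pvGet im (line - 1) column ≠ 1 then
      (PySem.List.pyRange 0 (2 * rTool + 1) 1).foldl (fun acc px =>
        if line - rTool ≥ 0 ∧ 0 ≤ column - rTool + px ∧ column - rTool + px < width then
          (if pvGet acc (line - rTool) (column - rTool + px) = 0 then
            pvSet2 acc (line - rTool) (column - rTool + px) else acc)
        else acc) im
    else im) = (upPart img0 width rTool line column).foldl paint im := by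
  have hfold := paintFold_guard
    (fun px => line - rTool ≥ 0 ∧ 0 ≤ column - rTool + px ∧ column - rTool + px < width)
    (fun px => column - rTool + px) (line - rTool)
    (PySem.List.pyRange 0 (2 * rTool + 1) 1) im
  have hcells : ((PySem.List.pyRange 0 (2 * rTool + 1) 1).filter
        (fun px => decide (line - rTool ≥ 0 ∧ 0 ≤ column - rTool + px ∧ column - rTool + px < width))).map
        (fun px => ((line - rTool, column - rTool + px) : Int × Int))
      = upCells width rTool line column := by
    unfold upCells segList
    by_cases hr : line - rTool ≥ 0
    · rw [if_pos hr]
      congr 1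
      apply List.filter_congr
      intro px _
      simp only [decide_eq_decide]
      omega
    · rw [if_neg hr]
      have hnil : ((PySem.List.pyRange 0 (2 * rTool + 1) 1).filter
          (fun px => decide (line - rTool ≥ 0 ∧ 0 ≤ column - rTool + px ∧ column - rTool + px < width))) = [] := by
        apply List.filter_eq_nil_iff.mpr
        intro px _
        simp only [decide_eq_true_eq]
        omega
      rw [hnil]
      rfl
  unfold upPart
  by_cases hC : line > 0 ∧ pvGet im line column = 1 ∧ pvGet im (line - 1) column ≠ 1
  · rw [if_pos hC, hfold, hcells,
      if_pos (by
        obtain ⟨hp, hg, hu⟩ := hC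
        exact ⟨(svRel_one h line column).mp hg, hp, fun hx => hu ((svRel_one h (line - 1) column).mpr hx)⟩)]
  · rw [if_neg hC, if_neg (by
      intro ⟨hg, hp, hu⟩
      exact hC ⟨hp, (svRel_one h line column).mpr hg, fun hx => hu ((svRel_one h (line - 1) column).mp hx)⟩)]
    rfl

theorem stepA_dn {img0 im : List (List Int)} (h : SvRel img0 im)
    (width height rTool line column : Int) :
    (if line < height - 1 ∧ pvGet im line column = 1 ∧ pvGet im (line + 1) column ≠ 1 then
      (PySem.List.pyRange 0 (2 * rTool + 1) 1).foldl (fun acc px =>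
        if line + rTool < height ∧ 0 ≤ column - rTool + px ∧ column - rTool + px < width then
          (if pvGet acc (line + rTool) (column - rTool + px) = 0 then
            pvSet2 acc (line + rTool) (column - rTool + px) else acc)
        else acc) im
    else im) = (dnPart img0 width height rTool line column).foldl paint im := by
  have hfold := paintFold_guard
    (fun px => line + rTool < height ∧ 0 ≤ column - rTool + px ∧ column - rTool + px < width)
    (fun px => column - rTool + px) (line + rTool)
    (PySem.List.pyRange 0 (2 * rTool + 1) 1) im
  have hcells : ((PySem.List.pyRange 0 (2 * rTool + 1) 1).filter
        (fun px => decide (line + rTool < height ∧ 0 ≤ column - rTool + px ∧ column - rTool + px < width))).map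
        (fun px => ((line + rTool, column - rTool + px) : Int × Int))
      = downCells height width rTool line column := by
    unfold downCells segList
    by_cases hr : line + rTool < height
    · rw [if_pos hr]
      congr 1
      apply List.filter_congr
      intro px _
      simp only [decide_eq_decide]
      omega
    · rw [if_neg hr]
      have hnil : ((PySem.List.pyRange 0 (2 * rTool + 1) 1).filter
          (fun px => decide (line + rTool < height ∧ 0 ≤ column - rTool + px ∧ column - rTool + px < width))) = [] := by
        apply List.filter_eq_nil_iff.mpr
        intro px _
        simp only [decide_eq_true_eq]
        omega
      rw [hnil]
      rfl
  unfold dnPart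
  by_cases hC : line < height - 1 ∧ pvGet im line column = 1 ∧ pvGet im (line + 1) column ≠ 1
  · rw [if_pos hC, hfold, hcells,
      if_pos (by
        obtain ⟨hp, hg, hu⟩ := hC
        exact ⟨(svRel_one h line column).mp hg, hp, fun hx => hu ((svRel_one h (line + 1) column).mpr hx)⟩)]
  · rw [if_neg hC, if_neg (by
      intro ⟨hg, hp, hu⟩
      exact hC ⟨hp, (svRel_one h line column).mpr hg, fun hx => hu ((svRel_one h (line + 1) column).mp hx)⟩)]
    rfl

theorem stepA_eq_paintFold {img0 im : List (List Int)} (h : SvRel img0 im)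
    (width height rTool line column : Int) :
    stepA width height rTool line im column
      = (posCells img0 width height rTool line column).foldl paint im := by
  unfold stepA
  rw [stepA_up h width rTool line column]
  rw [stepA_dn (svRel_paints h _) width height rTool line column]
  rw [posCells_eq, List.foldl_append]

theorem colFold {img0 : List (List Int)} (width height rTool line : Int) (cols : List Int) :
    ∀ im, SvRel img0 im →
      cols.foldl (stepA width height rTool line) im
        = (cols.flatMap (posCells img0 width height rTool line)).foldl paint im := by
  intro im h
  induction cols generalizing im with
  | nil => rfl
  | cons c cs ih =>
    simp only [List.foldl_cons, List.flatMap_cons, List.foldl_append]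
    rw [stepA_eq_paintFold h]
    exact ih _ (svRel_paints h _)

theorem rowFold {img0 : List (List Int)} (width height rTool : Int) (cols : List Int)
    (lines : List Int) :
    ∀ im, SvRel img0 im →
      lines.foldl (fun im line => cols.foldl (stepA width height rTool line) im) im
        = (lines.flatMap (fun line => cols.flatMap (posCells img0 width height rTool line))).foldl
            paint im := by
  intro im h
  induction lines generalizing im with
  | nil => rfl
  | cons l ls ih =>
    simp only [List.foldl_cons, List.flatMap_cons, List.foldl_append]
    rw [colFold width height rTool l cols im h]
    exact ih _ (svRel_paints h _)

-- ===================== B-side lemmas =====================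

-- the clipped segment in B's interval form
def intervalCells (width rTool r column : Int) : List (Int × Int) :=
  (PySem.List.pyRange (max 0 (column - rTool)) (min width (column + rTool + 1)) 1).map
    (fun c => (r, c))

theorem mem_segList_iff_interval (width rTool r column : Int) (y : Int × Int) :
    y ∈ segList width rTool r column ↔ y ∈ intervalCells width rTool r column := by
  simp only [segList, intervalCells, List.mem_map, List.mem_filter,
    PySem.List.mem_pyRange_one, decide_eq_true_eq]
  constructor
  · rintro ⟨px, ⟨⟨h0, h1⟩, h2, h3⟩, rfl⟩
    exact ⟨column - rTool + px, by omega, rfl⟩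
  · rintro ⟨c, ⟨hlo, hhi⟩, rfl⟩
    refine ⟨c - (column - rTool), ⟨⟨by omega, by omega⟩, by omega, by omega⟩, ?_⟩
    have : column - rTool + (c - (column - rTool)) = c := by omega
    rw [this]

-- cells B adds at one position (line, column)
def svCells (img0 : List (List Int)) (width height rTool line column : Int) : List (Int × Int) :=
  if pvGet img0 line column = 1 then
    (if line > 0 ∧ pvGet img0 (line - 1) column ≠ 1 ∧ line - rTool ≥ 0 then
        intervalCells width rTool (line - rTool) column else [])
    ++ (if line < height - 1 ∧ pvGet img0 (line + 1) column ≠ 1 ∧ line + rTool < height then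
        intervalCells width rTool (line + rTool) column else [])
  else []

theorem mem_svCells_iff_posCells (img0 : List (List Int)) (width height rTool line column : Int)
    (y : Int × Int) :
    y ∈ svCells img0 width height rTool line column
      ↔ y ∈ posCells img0 width height rTool line column := by
  unfold svCells posCells upCells downCells
  by_cases hg : pvGet img0 line column = 1 <;>
    by_cases hp : line > 0 <;>
    by_cases hu : pvGet img0 (line - 1) column = 1 <;>
    by_cases hr1 : rTool ≤ line <;>
    by_cases hq : line < height - 1 <;>
    by_cases hv : pvGet img0 (line + 1) column = 1 <;>
    by_cases hr2 : line + rTool < height <;>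
    simp [hg, hp, hu, hr1, hq, hv, hr2, mem_segList_iff_interval]

theorem mem_foldl_add (l : List Int) (f : Int → Int × Int) (m : PySem.Set (Int × Int))
    (y : Int × Int) :
    y ∈ l.foldl (fun m c => PySem.Set.add m (f c)) m ↔ y ∈ m ∨ y ∈ l.map f := by
  induction l generalizing m with
  | nil => simp
  | cons c cs ih =>
    simp only [List.foldl_cons, List.map_cons, List.mem_cons, ih, PySem.Set.mem_add]
    tauto

theorem mem_svAddRow (m : PySem.Set (Int × Int)) (width rTool r column : Int) (y : Int × Int) :
    y ∈ svAddRow m width rTool r column ↔ y ∈ m ∨ y ∈ intervalCells width rTool r column := by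
  unfold svAddRow intervalCells
  exact mem_foldl_add _ _ m y

-- generic: a fold of set-extending steps is characterised by per-step cells
theorem mem_foldl_step {β : Type} (step : PySem.Set (Int × Int) → β → PySem.Set (Int × Int))
    (cells : β → List (Int × Int))
    (hstep : ∀ m b y, y ∈ step m b ↔ y ∈ m ∨ y ∈ cells b) :
    ∀ (l : List β) (m : PySem.Set (Int × Int)) (y : Int × Int),
      y ∈ l.foldl step m ↔ y ∈ m ∨ ∃ b ∈ l, y ∈ cells b := by
  intro l
  induction l with
  | nil => simp
  | cons b bs ih =>
    intro m y
    simp only [List.foldl_cons, ih, hstep, List.mem_cons]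
    constructor
    · rintro ((h | h) | ⟨b', hb', h⟩)
      · exact Or.inl h
      · exact Or.inr ⟨b, Or.inl rfl, h⟩
      · exact Or.inr ⟨b', Or.inr hb', h⟩
    · rintro (h | ⟨b', (rfl | hb'), h⟩)
      · exact Or.inl (Or.inl h)
      · exact Or.inl (Or.inr h)
      · exact Or.inr ⟨b', hb', h⟩

theorem mem_svLineStep (img0 : List (List Int)) (width height rTool column : Int)
    (m : PySem.Set (Int × Int)) (line : Int) (y : Int × Int) :
    y ∈ svLineStep img0 width height rTool column m line
      ↔ y ∈ m ∨ y ∈ svCells img0 width height rTool line column := by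
  unfold svLineStep svCells
  split_ifs <;> simp [mem_svAddRow, List.mem_append] <;> tauto

theorem mem_svDetect (img0 : List (List Int)) (width height rTool : Int) (y : Int × Int) :
    y ∈ svDetect img0 width height rTool
      ↔ ∃ column ∈ PySem.List.pyRange 0 width 1, ∃ line ∈ PySem.List.pyRange 0 height 1,
          y ∈ svCells img0 width height rTool line column := by
  have hinner : ∀ (column : Int) (m : PySem.Set (Int × Int)) (y : Int × Int),
      y ∈ (PySem.List.pyRange 0 height 1).foldl (svLineStep img0 width height rTool column) m
      ↔ y ∈ m ∨ ∃ line ∈ PySem.List.pyRange 0 height 1,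
          y ∈ svCells img0 width height rTool line column := by
    intro column
    apply mem_foldl_step
    intro m line y
    exact mem_svLineStep img0 width height rTool column m line y
  have hstep : ∀ (m : PySem.Set (Int × Int)) (column : Int) (y : Int × Int),
      y ∈ (PySem.List.pyRange 0 height 1).foldl (svLineStep img0 width height rTool column) m
      ↔ y ∈ m ∨ y ∈ (PySem.List.pyRange 0 height 1).flatMap
          (fun line => svCells img0 width height rTool line column) := by
    intro m column y
    rw [hinner column m y]
    simp only [List.mem_flatMap]
  unfold svDetect
  rw [mem_foldl_step _ _ hstep]
  simp [PySem.Set.empty, List.mem_flatMap]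

-- every cell A (or B) targets lies inside the grid
theorem posCells_bounds (img0 : List (List Int)) (width height rTool line column : Int)
    (hline : 0 ≤ line ∧ line < height) (y : Int × Int)
    (hy : y ∈ posCells img0 width height rTool line column) :
    0 ≤ y.1 ∧ y.1 < height ∧ 0 ≤ y.2 ∧ y.2 < width := by
  unfold posCells upCells downCells at hy
  by_cases hg : pvGet img0 line column = 1 <;> simp [hg] at hy
  rcases hy with hy | hy
  · rcases hy with ⟨-, hy⟩
    by_cases hr : rTool ≤ line <;> simp [hr] at hy
    simp only [segList, List.mem_map, List.mem_filter, PySem.List.mem_pyRange_one,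
      decide_eq_true_eq] at hy
    obtain ⟨px, ⟨⟨hp0, hp1⟩, hc0, hc1⟩, rfl⟩ := hy
    constructor
    · omega
    · refine ⟨by omega, by omega, by omega⟩
  · rcases hy with ⟨hlt, hy⟩
    by_cases hr : line + rTool < height <;> simp [hr] at hy
    simp only [segList, List.mem_map, List.mem_filter, PySem.List.mem_pyRange_one,
      decide_eq_true_eq] at hy
    obtain ⟨px, ⟨⟨hp0, hp1⟩, hc0, hc1⟩, rfl⟩ := hy
    constructor
    · omega
    · refine ⟨by omega, by omega, by omega⟩

-- ============ pointwise characterisation of paint-folds ============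

theorem paint_length (im : List (List Int)) (rc : Int × Int) :
    (paint im rc).length = im.length := by
  unfold paint
  split_ifs <;> simp [pvSet2, List.length_modify]

theorem paint_row_length (im : List (List Int)) (rc : Int × Int) (i : Nat) :
    ((paint im rc).getD i []).length = (im.getD i []).length := by
  have h := svRel_paint (svRel_refl im) rc
  exact (h.2 i 0).1

theorem paint_getD (im : List (List Int)) (rc : Int × Int) (i j : Nat) :
    ((paint im rc).getD i []).getD j 0
      = if rc.1.toNat = i ∧ rc.2.toNat = j ∧ i < im.length ∧ j < (im.getD i []).length
            ∧ (im.getD i []).getD j 0 = 0 then 2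
        else (im.getD i []).getD j 0 := by
  by_cases h0 : pvGet im rc.1 rc.2 = 0
  · simp only [paint, if_pos h0, pvSet2]
    rw [getD_modify]
    by_cases hi : rc.1.toNat = i ∧ i < im.length
    · rw [if_pos hi]
      rw [getD_modify]
      by_cases hj : rc.2.toNat = j ∧ j < (im.getD i []).length
      · rw [if_pos hj]
        have hc : (im.getD i []).getD j 0 = 0 := by
          simp only [pvGet] at h0
          rw [hi.1, hj.1] at h0
          exact h0
        rw [if_pos ⟨hi.1, hj.1, hi.2, hj.2, hc⟩]
      · rw [if_neg hj, if_neg (fun hcon => hj ⟨hcon.2.1, hcon.2.2.2.1⟩)]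
    · rw [if_neg hi, if_neg (fun hcon => hi ⟨hcon.1, hcon.2.2.1⟩)]
  · simp only [paint, if_neg h0]
    rw [if_neg (by
      rintro ⟨hi1, hj1, hi2, hj2, hc⟩
      apply h0
      simp only [pvGet]
      rw [hi1, hj1]
      exact hc)]

theorem foldl_paint_getD (ws : List (Int × Int)) (im : List (List Int)) (i j : Nat) :
    ((ws.foldl paint im).getD i []).getD j 0
      = if (∃ rc ∈ ws, rc.1.toNat = i ∧ rc.2.toNat = j) ∧ i < im.length
            ∧ j < (im.getD i []).length ∧ (im.getD i []).getD j 0 = 0 then 2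
        else (im.getD i []).getD j 0 := by
  induction ws generalizing im with
  | nil => simp
  | cons rc ws ih =>
    simp only [List.foldl_cons]
    rw [ih]
    rw [paint_length, paint_row_length, paint_getD]
    by_cases hC : rc.1.toNat = i ∧ rc.2.toNat = j ∧ i < im.length ∧ j < (im.getD i []).length
        ∧ (im.getD i []).getD j 0 = 0
    · rw [if_pos hC]
      rw [if_neg (by rintro ⟨-, -, -, h2⟩; omega)]
      rw [if_pos ⟨⟨rc, List.mem_cons_self, hC.1, hC.2.1⟩, hC.2.2⟩]
    · rw [if_neg hC]
      by_cases hD : (∃ rc' ∈ ws, rc'.1.toNat = i ∧ rc'.2.toNat = j) ∧ i < im.length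
          ∧ j < (im.getD i []).length ∧ (im.getD i []).getD j 0 = 0
      · rw [if_pos hD]
        rw [if_pos ⟨⟨hD.1.choose, List.mem_cons_of_mem _ hD.1.choose_spec.1,
          hD.1.choose_spec.2⟩, hD.2⟩]
      · rw [if_neg hD]
        by_cases hE : (∃ rc' ∈ rc :: ws, rc'.1.toNat = i ∧ rc'.2.toNat = j) ∧ i < im.length
            ∧ j < (im.getD i []).length ∧ (im.getD i []).getD j 0 = 0
        · exfalso
          obtain ⟨⟨rc', hmem, hm1, hm2⟩, hr1, hr2, hr3⟩ := hE
          rcases List.mem_cons.mp hmem with rfl | hmem'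
          · exact hC ⟨hm1, hm2, hr1, hr2, hr3⟩
          · exact hD ⟨⟨rc', hmem', hm1, hm2⟩, hr1, hr2, hr3⟩
        · rw [if_neg hE]

theorem foldl_paint_ext (W1 W2 : List (Int × Int)) (im : List (List Int))
    (hmem : ∀ y, y ∈ W1 ↔ y ∈ W2) :
    W1.foldl paint im = W2.foldl paint im := by
  have h1 := svRel_paints (svRel_refl im) W1
  have h2 := svRel_paints (svRel_refl im) W2
  apply List.ext_getElem (by rw [h1.1, h2.1])
  intro i hi1 hi2
  have hrow : ∀ j : Nat, ((W1.foldl paint im).getD i []).getD j 0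
      = ((W2.foldl paint im).getD i []).getD j 0 := by
    intro j
    rw [foldl_paint_getD, foldl_paint_getD]
    have hex : (∃ rc ∈ W1, rc.1.toNat = i ∧ rc.2.toNat = j)
        ↔ (∃ rc ∈ W2, rc.1.toNat = i ∧ rc.2.toNat = j) := by
      exact ⟨fun ⟨rc, hm, h⟩ => ⟨rc, (hmem rc).mp hm, h⟩,
        fun ⟨rc, hm, h⟩ => ⟨rc, (hmem rc).mpr hm, h⟩⟩
    by_cases hA : (∃ rc ∈ W1, rc.1.toNat = i ∧ rc.2.toNat = j) ∧ i < im.length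
        ∧ j < (im.getD i []).length ∧ (im.getD i []).getD j 0 = 0
    · rw [if_pos hA, if_pos ⟨hex.mp hA.1, hA.2⟩]
    · rw [if_neg hA, if_neg (by rintro ⟨he, hr⟩; exact hA ⟨hex.mpr he, hr⟩)]
  have e1 : (W1.foldl paint im)[i] = (W1.foldl paint im).getD i [] :=
    (List.getD_eq_getElem _ _ hi1).symm
  have e2 : (W2.foldl paint im)[i] = (W2.foldl paint im).getD i [] :=
    (List.getD_eq_getElem _ _ hi2).symm
  rw [e1, e2]
  apply List.ext_getElem (by rw [(h1.2 i 0).1, (h2.2 i 0).1])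
  intro j hj1 hj2
  rw [← List.getD_eq_getElem _ 0 hj1, ← List.getD_eq_getElem _ 0 hj2]
  exact hrow j

-- B's repaint row is a paint-fold over the marked cells of that row
theorem repaintRow (marks : PySem.Set (Int × Int)) (i : Int) (cols : List Int)
    (im : List (List Int)) :
    cols.foldl (fun im j =>
      if pvGet im i j = 0 ∧ PySem.Set.contains marks (i, j) = true then pvSet2 im i j else im) im
    = ((cols.filter (fun j => PySem.Set.contains marks (i, j))).map
        (fun j => ((i, j) : Int × Int))).foldl paint im := by
  rw [List.foldl_map, List.foldl_filter]
  have : (fun (im : List (List Int)) (j : Int) =>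
        if (fun j => PySem.Set.contains marks (i, j)) j = true then paint im (i, j) else im)
      = fun im j =>
        if pvGet im i j = 0 ∧ PySem.Set.contains marks (i, j) = true then pvSet2 im i j else im := by
    funext im j
    by_cases hc : PySem.Set.contains marks (i, j) = true <;>
      by_cases h0 : pvGet im i j = 0 <;>
      simp [paint, h0]
  rw [this]

theorem foldl_paint_flatMap (g : Int → List (Int × Int)) (lines : List Int)
    (im : List (List Int)) :
    lines.foldl (fun im l => (g l).foldl paint im) im = (lines.flatMap g).foldl paint im := by
  induction lines generalizing im with
  | nil => rfl
  | cons l ls ih =>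
    simp only [List.foldl_cons, List.flatMap_cons, List.foldl_append]
    exact ih _

-- ===== VERDICT (by name: the statement is the Claim_ definition above) =====
theorem scanVertical_spec : Claim_equal_scanVertical := by
  intro image rTool _ _
  unfold Spec_scanVertical
  show scanVertical image rTool = scanVertical_alt image rTool
  set width : Int := (image.headI.length : Int) with hw
  set height : Int := (image.length : Int) with hh
  set lines := PySem.List.pyRange 0 height 1 with hlines
  set cols := PySem.List.pyRange 0 width 1 with hcols
  set marks := svDetect image width height rTool with hmarks
  -- A as a paint-fold
  have hA : scanVertical image rTool
      = (lines.flatMap (fun line => cols.flatMap (posCells image width height rTool line))).foldl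
          paint image := by
    have : scanVertical image rTool
        = lines.foldl (fun im line => cols.foldl (stepA width height rTool line) im) image := rfl
    rw [this, rowFold (img0 := image) _ _ _ _ _ image (svRel_refl image)]
  -- B as a paint-fold
  have hB : scanVertical_alt image rTool
      = (lines.flatMap (fun i => (cols.filter (fun j => PySem.Set.contains marks (i, j))).map
          (fun j => ((i, j) : Int × Int)))).foldl paint image := by
    have h1 : scanVertical_alt image rTool
        = lines.foldl (fun im i => cols.foldl (fun im j =>
            if pvGet im i j = 0 ∧ PySem.Set.contains marks (i, j) = true then pvSet2 im i j
            else im) im) image := rfl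
    rw [h1]
    have h2 : (fun (im : List (List Int)) (i : Int) => cols.foldl (fun im j =>
          if pvGet im i j = 0 ∧ PySem.Set.contains marks (i, j) = true then pvSet2 im i j
          else im) im)
        = fun im i => ((cols.filter (fun j => PySem.Set.contains marks (i, j))).map
            (fun j => ((i, j) : Int × Int))).foldl paint im := by
      funext im i
      exact repaintRow marks i cols im
    rw [h2, foldl_paint_flatMap]
  rw [hA, hB]
  apply foldl_paint_ext
  intro y
  constructor
  · intro hy
    rw [List.mem_flatMap] at hy
    obtain ⟨line, hline, hy⟩ := hy
    rw [List.mem_flatMap] at hy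
    obtain ⟨col, hcol, hy⟩ := hy
    have hlb := (PySem.List.mem_pyRange_one).mp hline
    have hcb := (PySem.List.mem_pyRange_one).mp hcol
    have hbnd := posCells_bounds image width height rTool line col ⟨hlb.1, hlb.2⟩ y hy
    rw [List.mem_flatMap]
    refine ⟨y.1, (PySem.List.mem_pyRange_one).mpr ⟨hbnd.1, hbnd.2.1⟩, ?_⟩
    rw [List.mem_map]
    refine ⟨y.2, List.mem_filter.mpr ⟨(PySem.List.mem_pyRange_one).mpr ⟨hbnd.2.2.1, hbnd.2.2.2⟩, ?_⟩, ?_⟩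
    · rw [PySem.Set.contains_iff]
      rw [hmarks, mem_svDetect]
      exact ⟨col, hcol, line, hline, (mem_svCells_iff_posCells _ _ _ _ _ _ _).mpr hy⟩
    · exact Prod.mk.eta
  · intro hy
    rw [List.mem_flatMap] at hy
    obtain ⟨i, hi, hy⟩ := hy
    rw [List.mem_map] at hy
    obtain ⟨j, hj, rfl⟩ := hy
    have hjf := List.mem_filter.mp hj
    have hmem : ((i, j) : Int × Int) ∈ marks := (PySem.Set.contains_iff _ _).mp hjf.2
    rw [hmarks, mem_svDetect] at hmem
    obtain ⟨col, hcol, line, hline, hc⟩ := hmem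
    rw [List.mem_flatMap]
    exact ⟨line, hline, List.mem_flatMap.mpr
      ⟨col, hcol, (mem_svCells_iff_posCells _ _ _ _ _ _ _).mp hc⟩⟩
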